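-- pv_equiv track=rewrite | github.com/ehdnd/SCCC | contests/codeforces/1043_div3/D.py | f
-- ===== SOURCE A (Python) =====
-- memo = {}
--
-- def f(n_str: str) -> int:
--     n = int(n_str)
--     # base
--     if n < 10:
--         return n * (n + 1) // 2
--
--     # 존재
--     if n_str in memo:
--         return memo[n_str]
--
--     zegop = 10 ** (len(n_str) - 1)
--     first_digit = n // zegop
--
--     # 첫 번째
--     res = f(str(zegop - 1)) * first_digit
--     #
--     res += (first_digit * (first_digit - 1) // 2) * zegop
--
--     # 나머지 구해와라
--     left = n % zegop
--     res += first_digit * (left + 1)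
--     res += f(str(left))
--
--     memo[n_str] = res
--     return res
-- ===== SOURCE B (Python) =====
-- def f(n_str: str) -> int:
--     n = int(n_str)
--     if n < 10:
--         return n * (n + 1) // 2
--     # One bottom-up pass over the decimal digits of n (least significant first):
--     # 'total' accumulates S(rest) where rest = the low digits consumed so far,
--     # using the closed-form block sums instead of recursion + memoisation.
--     total = 0
--     pow10 = 1    # 10**p
--     blocks = 0   # S(10**p - 1)
--     rest = 0     # n mod 10**p
--     m = n
--     while m > 0:
--         m, d = divmod(m, 10)
--         total += d * blocks + d * (d - 1) // 2 * pow10 + d * (rest + 1)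
--         rest += d * pow10
--         blocks = blocks * 10 + 45 * pow10
--         pow10 *= 10
--     return total
-- ===== Notes on version B (the rewrite author's own statement) =====
-- stated objective: alternative
-- what changed: A computes S(n) by top-digit recursion on str(n) with a module-level memo dict and repeated int()/str() conversions; B runs one bottom-up loop over the digits of n (least significant first, via divmod) maintaining the closed-form block sum S(10^p-1) incrementally, with no recursion, no memo and no string handling.
import Mathlib
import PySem

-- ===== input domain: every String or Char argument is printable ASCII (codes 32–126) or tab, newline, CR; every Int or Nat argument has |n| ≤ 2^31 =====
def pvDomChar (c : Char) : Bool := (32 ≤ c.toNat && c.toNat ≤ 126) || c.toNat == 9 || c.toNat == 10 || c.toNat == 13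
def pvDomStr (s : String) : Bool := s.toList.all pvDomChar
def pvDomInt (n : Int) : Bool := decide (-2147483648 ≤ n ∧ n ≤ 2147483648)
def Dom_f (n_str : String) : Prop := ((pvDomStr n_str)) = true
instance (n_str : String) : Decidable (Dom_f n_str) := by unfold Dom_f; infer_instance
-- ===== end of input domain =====

-- f computes S(n) = sum of decimal digit sums of 0..int(n_str).  B replaces A's memoized
-- top-digit string recursion by a single least-significant-digit-first loop with closed-form
-- block sums (no recursion, no string conversions, no memo).  Return values agree; A also
-- writes to a module-level memo dict (a side effect B does not reproduce).

-- ===== PORT A =====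
-- A's recursion re-parses str(...) arguments; ported with a fuel counter equal to len(n_str),
-- which the proof shows suffices on every input A accepts (a totality guard only, not a new
-- algorithm).  The module-level memo cache only speeds A up and never changes the value
-- returned, so the pure port omits it.  Where int(n_str) raises ValueError (ofStr? = none,
-- excluded by Pre_f) the port returns 0.
def fAux : Nat → String → Int
  | 0, _ => 0
  | fuel + 1, n_str =>
    match PySem.Int.ofStr? n_str with
    | none => 0
    | some n =>
      if n < 10 then PySem.Int.floordiv (n * (n + 1)) 2
      else
        let zegop : Int := (10 : Int) ^ (PySem.Str.len n_str - 1).toNat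
        let first_digit := PySem.Int.floordiv n zegop
        let res1 := fAux fuel (PySem.Int.toStr (zegop - 1)) * first_digit
        let res2 := res1 + PySem.Int.floordiv (first_digit * (first_digit - 1)) 2 * zegop
        let left := PySem.Int.mod n zegop
        let res3 := res2 + first_digit * (left + 1)
        res3 + fAux fuel (PySem.Int.toStr left)

def f (n_str : String) : Int := fAux (PySem.Str.len n_str).toNat n_str

-- ===== PORT B =====
-- termination measure for the while-loop (cited by fAltLoop's decreasing_by)
theorem pvLoopDec (m : ℤ) (h : 0 < m) : (PySem.Int.floordiv m 10).toNat < m.toNat := by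
  rw [PySem.Int.floordiv_eq_ediv_of_pos (by norm_num)]
  omega

-- the `while m > 0` loop of Source B: m, d = divmod(m, 10) ported as floordiv/mod (divisor 10 ≠ 0)
def fAltLoop (m pow10 blocks rest total : Int) : Int :=
  if h : 0 < m then
    fAltLoop (PySem.Int.floordiv m 10) (pow10 * 10) (blocks * 10 + 45 * pow10)
      (rest + PySem.Int.mod m 10 * pow10)
      (total + PySem.Int.mod m 10 * blocks +
        PySem.Int.floordiv (PySem.Int.mod m 10 * (PySem.Int.mod m 10 - 1)) 2 * pow10 +
        PySem.Int.mod m 10 * (rest + 1))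
  else total
termination_by m.toNat
decreasing_by exact pvLoopDec m h

def f_alt (n_str : String) : Int :=
  match PySem.Int.ofStr? n_str with
  | none => 0
  | some n =>
    if n < 10 then PySem.Int.floordiv (n * (n + 1)) 2
    else fAltLoop n 1 0 0 0

-- ===== PRECONDITION & SPEC =====
-- Pre_f: exactly the strings int() parses; on others A raises ValueError.
def Pre_f (n_str : String) : Prop := (PySem.Int.ofStr? n_str).isSome = true
instance (n_str : String) : Decidable (Pre_f n_str) := by unfold Pre_f; infer_instance

def pvWitness_f : String := "5781"

def Spec_f (n_str : String) (out : Int) : Prop := out = f_alt n_str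
instance (n_str : String) (out : Int) : Decidable (Spec_f n_str out) := by unfold Spec_f; infer_instance

-- ===== CLAIM (what is proved, stated in full; the proofs are below) =====
def Claim_equal_f : Prop := ∀ (n_str : String), Dom_f n_str → Pre_f n_str → Spec_f n_str (f n_str)

-- ===== LEMMAS AND PROOFS =====

def pvStep (a : ℕ) (c : Char) : ℕ := a * 10 + (c.toNat - '0'.toNat)

theorem pvDropWhile_eq_self {p : Char → Bool} {l : List Char} (h : ∀ c ∈ l, p c = false) :
    List.dropWhile p l = l := by
  rw [List.dropWhile_eq_self_iff]
  intro hl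
  simp [h _ (List.getElem_mem hl)]

theorem pvIsIntSpace_false {c : Char} (h : c.isDigit = true) : PySem.Int.isIntSpace c = false := by
  have hne : ¬(c = ' ' ∨ c = '\t' ∨ c = '\n' ∨ c = '\r' ∨ c = '\x0b' ∨ c = '\x0c') := by
    rintro (rfl|rfl|rfl|rfl|rfl|rfl) <;> simp at h
  simp only [PySem.Int.isIntSpace, Bool.or_eq_false_iff, decide_eq_false_iff_not]
  tauto

theorem pvDigit_le {c : Char} (h : c.isDigit = true) : c.toNat - '0'.toNat ≤ 9 := by
  simp only [Char.isDigit, Bool.and_eq_true, decide_eq_true_eq] at h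
  have h1 : c.toNat ≤ 57 := h.2
  have h2 : '0'.toNat = 48 := rfl
  omega

-- abstract characterization of the private digit parser used by PySem.Int.ofChars?
theorem dv_val (g1 : List Char → Option ℕ) (g : List Char → Bool → ℕ → Option ℕ)
    (hseed : ∀ rest, g1 ('0' :: rest) = g rest true (0 * 10 + ('0'.toNat - '0'.toNat)))
    (hnil : ∀ aft acc, g [] aft acc = if aft = true then some acc else none)
    (hcons : ∀ c rest aft acc, g (c :: rest) aft acc =
      if c.isDigit = true then g rest true (acc * 10 + (c.toNat - '0'.toNat))
      else if c = '_' ∧ aft = true then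
        (List.casesOn rest none (fun d _tail => if d.isDigit = true then g rest false acc else none))
      else none)
    (hg1 : ∀ c rest, g1 (c :: rest) = g (c :: rest) false 0) :
    ∀ ds c rest, ds = c :: rest → (∀ x ∈ ds, x.isDigit = true) →
      (Option.map (fun n : ℤ => n) (do let a ← g1 ds; pure ((a : ℕ) : ℤ))) = some ((ds.foldl pvStep 0 : ℕ) : ℤ) := by
  have aux : ∀ ds acc, (∀ c ∈ ds, c.isDigit = true) → g ds true acc = some (ds.foldl pvStep acc) := by
    intro ds
    induction ds with
    | nil => intro acc _; simp [hnil]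
    | cons c rest ih =>
      intro acc hd
      rw [hcons, if_pos (hd c (by simp))]
      simpa [pvStep] using ih _ (fun x hx => hd x (by simp [hx]))
  rintro ds c rest rfl hd
  rw [hg1, hcons, if_pos (hd c (by simp))]
  rw [show (0 * 10 + (c.toNat - '0'.toNat)) = pvStep 0 c from rfl, aux rest _ (fun x hx => hd x (by simp [hx]))]
  rfl

theorem dv_bound (g1 : List Char → Option ℕ) (g : List Char → Bool → ℕ → Option ℕ)
    (hseed : ∀ rest, g1 ('0' :: rest) = g rest true (0 * 10 + ('0'.toNat - '0'.toNat)))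
    (hnil : ∀ aft acc, g [] aft acc = if aft = true then some acc else none)
    (hcons : ∀ c rest aft acc, g (c :: rest) aft acc =
      if c.isDigit = true then g rest true (acc * 10 + (c.toNat - '0'.toNat))
      else if c = '_' ∧ aft = true then
        (List.casesOn rest none (fun d _tail => if d.isDigit = true then g rest false acc else none))
      else none)
    (hg1nil : g1 [] = none)
    (hg1 : ∀ c rest, g1 (c :: rest) = g (c :: rest) false 0) :
    ∀ ds v, g1 ds = some v → v < 10 ^ ds.length := by
  have aux : ∀ ds aft acc v, g ds aft acc = some v → v < (acc + 1) * 10 ^ ds.length := by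
    intro ds
    induction ds with
    | nil =>
      intro aft acc v h
      rw [hnil] at h
      rcases aft with _ | _ <;> simp_all
    | cons c rest ih =>
      intro aft acc v h
      rw [hcons] at h
      split_ifs at h with h1 h2
      · have hb := ih true (acc * 10 + (c.toNat - '0'.toNat)) v h
        have he : c.toNat - '0'.toNat ≤ 9 := pvDigit_le h1
        have : (acc * 10 + (c.toNat - '0'.toNat) + 1) * 10 ^ rest.length ≤ (acc + 1) * 10 ^ (c :: rest).length := by
          simp only [List.length_cons, pow_succ]
          calc (acc * 10 + (c.toNat - '0'.toNat) + 1) * 10 ^ rest.length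
              ≤ ((acc + 1) * 10) * 10 ^ rest.length := by
                apply Nat.mul_le_mul_right; omega
            _ = (acc + 1) * (10 ^ rest.length * 10) := by ring
        omega
      · cases rest with
        | nil => simp at h
        | cons d tail =>
          simp only [List.casesOn] at h
          split_ifs at h with h3
          · have hb := ih false acc v h
            have : (acc + 1) * 10 ^ (d :: tail).length ≤ (acc + 1) * 10 ^ (c :: d :: tail).length := by
              apply Nat.mul_le_mul_left
              apply Nat.pow_le_pow_right <;> simp
            omega
  intro ds v h
  cases ds with
  | nil => rw [hg1nil] at h; exact absurd h (by simp)
  | cons c rest =>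
    rw [hg1 c rest] at h
    have := aux _ _ _ _ h
    simpa using this

theorem ofChars?_digits (cs : List Char) (c0 : Char) (r0 : List Char)
    (hcs : cs = c0 :: r0) (hd : ∀ c ∈ cs, c.isDigit = true) :
    PySem.Int.ofChars? cs = some ((cs.foldl pvStep 0 : ℕ) : ℤ) := by
  have hsp : ∀ x ∈ cs, PySem.Int.isIntSpace x = false := fun x hx => pvIsIntSpace_false (hd x hx)
  simp only [PySem.Int.ofChars?]
  rw [pvDropWhile_eq_self hsp,
      pvDropWhile_eq_self (by intro x hx; exact hsp x (by simpa using hx)),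
      List.reverse_reverse]
  subst hcs
  split
  · exfalso
    rename_i ds heq
    cases heq
    simpa using hd '-' (by simp)
  · exfalso
    rename_i ds heq
    cases heq
    simpa using hd '+' (by simp)
  · refine dv_val ?g1 ?g ?hseed ?hnil ?hcons ?hg1 (c0 :: r0) c0 r0 rfl hd
    case hseed => intro rest; rfl
    case hnil => intro aft acc; rfl
    case hcons =>
      intro c rest aft acc
      conv_lhs => whnf
      rcases hc : c.isDigit
      · simp only [hc]
        by_cases hC : (c = '_' ∧ aft = true)
        · simp only [hC]
          cases rest <;> rfl
        · simp only [if_neg hC]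
          rfl
      · simp only [hc]
        rfl
    case hg1 => intro c rest; rfl

theorem ofChars?_nil : PySem.Int.ofChars? [] = none := rfl

theorem parse_bound (cs : List Char) (n : ℤ) (h : PySem.Int.ofChars? cs = some n) :
    n < ((10 : ℕ) ^ cs.length : ℕ) := by
  have hpow : ∀ k : ℕ, (0 : ℤ) < ((10 : ℕ) ^ k : ℕ) := by
    intro k; exact_mod_cast Nat.pow_pos (n := k) (by norm_num)
  simp only [PySem.Int.ofChars?] at h
  have hlen : (List.dropWhile PySem.Int.isIntSpace
      (List.dropWhile PySem.Int.isIntSpace cs).reverse).reverse.length ≤ cs.length := by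
    calc (List.dropWhile PySem.Int.isIntSpace (List.dropWhile PySem.Int.isIntSpace cs).reverse).reverse.length
        = (List.dropWhile PySem.Int.isIntSpace (List.dropWhile PySem.Int.isIntSpace cs).reverse).length := by
          simp
      _ ≤ (List.dropWhile PySem.Int.isIntSpace cs).reverse.length := List.length_dropWhile_le _ _
      _ = (List.dropWhile PySem.Int.isIntSpace cs).length := by simp
      _ ≤ cs.length := List.length_dropWhile_le _ _
  split at h
  · rename_i ds heq
    simp only [Option.map_eq_some_iff] at h
    obtain ⟨a, ha, rfl⟩ := h
    simp only [Option.bind_eq_bind, Option.bind_eq_some_iff] at ha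
    obtain ⟨b, hb, hpure⟩ := ha
    have : (0:ℤ) ≤ b := by positivity
    have := hpow cs.length
    simp only [Option.pure_def, Option.some_inj] at hpure
    omega
  · rename_i ds heq
    simp only [Option.map_eq_some_iff] at h
    obtain ⟨a, ha, rfl⟩ := h
    simp only [Option.bind_eq_bind, Option.bind_eq_some_iff] at ha
    obtain ⟨b, hb, hpure⟩ := ha
    simp only [Option.pure_def, Option.some_inj] at hpure
    subst hpure
    have hbnd : b < 10 ^ ds.length := by
      refine dv_bound _ ?g ?hseed ?hnil ?hcons ?hg1nil ?hg1 ds b hb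
      case hseed => intro rest; rfl
      case hnil => intro aft acc; rfl
      case hcons =>
        intro c rest aft acc
        conv_lhs => whnf
        rcases hc : c.isDigit
        · simp only [hc]
          by_cases hC : (c = '_' ∧ aft = true)
          · simp only [hC]
            cases rest <;> rfl
          · simp only [if_neg hC]
            rfl
        · simp only [hc]
          rfl
      case hg1nil => rfl
      case hg1 => intro c rest; rfl
    have hds : ds.length + 1 ≤ cs.length := by
      rw [heq] at hlen; simpa using hlen
    have : (10:ℕ) ^ ds.length ≤ 10 ^ cs.length := Nat.pow_le_pow_right (by norm_num) (by omega)
    have hb2 : b < 10 ^ cs.length := lt_of_lt_of_le hbnd this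
    exact_mod_cast hb2
  · rename_i ds hne1 hne2
    simp only [Option.map_eq_some_iff] at h
    obtain ⟨a, ha, rfl⟩ := h
    simp only [Option.bind_eq_bind, Option.bind_eq_some_iff] at ha
    obtain ⟨b, hb, hpure⟩ := ha
    simp only [Option.pure_def, Option.some_inj] at hpure
    subst hpure
    have hbnd : b < 10 ^ (List.dropWhile PySem.Int.isIntSpace
        (List.dropWhile PySem.Int.isIntSpace cs).reverse).reverse.length := by
      refine dv_bound _ ?g ?hseed ?hnil ?hcons ?hg1nil ?hg1 _ b hb
      case hseed => intro rest; rfl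
      case hnil => intro aft acc; rfl
      case hcons =>
        intro c rest aft acc
        conv_lhs => whnf
        rcases hc : c.isDigit
        · simp only [hc]
          by_cases hC : (c = '_' ∧ aft = true)
          · simp only [hC]
            cases rest <;> rfl
          · simp only [if_neg hC]
            rfl
        · simp only [hc]
          rfl
      case hg1nil => rfl
      case hg1 => intro c rest; rfl
    have : (10:ℕ) ^ (List.dropWhile PySem.Int.isIntSpace
        (List.dropWhile PySem.Int.isIntSpace cs).reverse).reverse.length ≤ 10 ^ cs.length :=
      Nat.pow_le_pow_right (by norm_num) hlen
    have hb2 : b < 10 ^ cs.length := lt_of_lt_of_le hbnd this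
    exact_mod_cast hb2

theorem digitChar_isDigit {d : ℕ} (h : d < 10) : (Nat.digitChar d).isDigit = true := by
  interval_cases d <;> decide

theorem digitChar_val {d : ℕ} (h : d < 10) : (Nat.digitChar d).toNat = 48 + d := by
  interval_cases d <;> decide

theorem tdc_spec : ∀ (F : ℕ), ∀ (N : ℕ) (acc : List Char), N < 10 ^ (F + 1) →
    ∃ l, Nat.toDigitsCore 10 (F + 1) N acc = l ++ acc ∧ l ≠ [] ∧
      (∀ c ∈ l, c.isDigit = true) ∧ ∀ a, l.foldl pvStep a = a * 10 ^ l.length + N := by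
  intro F
  induction F with
  | zero =>
    intro N acc hN
    refine ⟨[Nat.digitChar (N % 10)], ?_, by simp, ?_, ?_⟩
    · rw [Nat.toDigitsCore]
      simp [Nat.div_eq_of_lt (by simpa using hN)]
    · intro c hc
      simp at hc
      subst hc
      exact digitChar_isDigit (Nat.mod_lt _ (by norm_num))
    · intro a
      simp [pvStep, digitChar_val (Nat.mod_lt _ (by norm_num) : N % 10 < 10),
        (show '0'.toNat = 48 from rfl)]
      have : N % 10 = N := Nat.mod_eq_of_lt (by simpa using hN)
      omega
  | succ F ih =>
    intro N acc hN
    by_cases h0 : N / 10 = 0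
    · refine ⟨[Nat.digitChar (N % 10)], ?_, by simp, ?_, ?_⟩
      · rw [Nat.toDigitsCore]
        simp [h0]
      · intro c hc
        simp at hc
        subst hc
        exact digitChar_isDigit (Nat.mod_lt _ (by norm_num))
      · intro a
        simp [pvStep, digitChar_val (Nat.mod_lt _ (by norm_num) : N % 10 < 10),
          (show '0'.toNat = 48 from rfl)]
        have : N % 10 = N := by omega
        omega
    · have hdiv : N / 10 < 10 ^ (F + 1) := by
        have hp : (10:ℕ) ^ (F + 1 + 1) = 10 ^ (F + 1) * 10 := by ring
        omega
      obtain ⟨l, he, hne, hdig, hval⟩ := ih (N / 10) (Nat.digitChar (N % 10) :: acc) hdiv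
      refine ⟨l ++ [Nat.digitChar (N % 10)], ?_, by simp, ?_, ?_⟩
      · rw [Nat.toDigitsCore]
        simp only [h0, if_false]
        rw [he]
        simp
      · intro c hc
        rcases List.mem_append.mp hc with hc | hc
        · exact hdig c hc
        · simp at hc
          subst hc
          exact digitChar_isDigit (Nat.mod_lt _ (by norm_num))
      · intro a
        rw [List.foldl_append]
        simp only [List.foldl_cons, List.foldl_nil]
        rw [hval a]
        have hdc : (Nat.digitChar (N % 10)).toNat = 48 + N % 10 :=
          digitChar_val (Nat.mod_lt _ (by norm_num))
        have key : pvStep (a * 10 ^ l.length + N / 10) (Nat.digitChar (N % 10)) =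
            a * 10 ^ (l.length + 1) + N := by
          simp only [pvStep, hdc, (show '0'.toNat = 48 from rfl)]
          calc (a * 10 ^ l.length + N / 10) * 10 + (48 + N % 10 - 48)
              = a * (10 ^ l.length * 10) + (N / 10 * 10 + (48 + N % 10 - 48)) := by ring_nf
            _ = a * 10 ^ (l.length + 1) + N := by
                rw [pow_succ]
                have := Nat.div_add_mod N 10
                omega
        rw [key]
        simp

theorem toDigits_spec (N : ℕ) :
    Nat.toDigits 10 N ≠ [] ∧ (∀ c ∈ Nat.toDigits 10 N, c.isDigit = true) ∧
      (Nat.toDigits 10 N).foldl pvStep 0 = N := by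
  have hN : N < 10 ^ (N + 1) := by
    have h1 : N < 10 ^ N := Nat.lt_pow_self (by norm_num)
    have h2 : (10:ℕ) ^ N ≤ 10 ^ (N + 1) := Nat.pow_le_pow_right (by norm_num) (by omega)
    omega
  obtain ⟨l, he, hne, hdig, hval⟩ := tdc_spec N N [] hN
  have : Nat.toDigits 10 N = l := by
    rw [Nat.toDigits]  -- definitional
    simpa using he
  rw [this]
  exact ⟨hne, hdig, by simpa using hval 0⟩

theorem toChars_natCast (N : ℕ) : PySem.Int.toChars ((N : ℕ) : ℤ) = Nat.toDigits 10 N := by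
  simp [PySem.Int.toChars]

theorem ofStr?_toStr_natCast (N : ℕ) :
    PySem.Int.ofStr? (PySem.Int.toStr ((N : ℕ) : ℤ)) = some ((N : ℕ) : ℤ) := by
  have h1 : PySem.Int.ofStr? (PySem.Int.toStr ((N : ℕ) : ℤ)) =
      PySem.Int.ofChars? (PySem.Int.toChars ((N : ℕ) : ℤ)) := by
    rw [PySem.Int.toStr, PySem.Int.ofStr?_ofList]
  rw [h1, toChars_natCast]
  obtain ⟨hne, hdig, hval⟩ := toDigits_spec N
  obtain ⟨c0, r0, hcr⟩ : ∃ c0 r0, Nat.toDigits 10 N = c0 :: r0 := by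
    cases h : Nat.toDigits 10 N with
    | nil => exact absurd h hne
    | cons a b => exact ⟨a, b, rfl⟩
  rw [ofChars?_digits _ c0 r0 hcr hdig, hval]

def dsum (n : ℕ) : ℕ :=
  if h : n = 0 then 0 else n % 10 + dsum (n / 10)
termination_by n
decreasing_by exact Nat.div_lt_self (Nat.pos_of_ne_zero h) (by norm_num)

theorem dsum_zero : dsum 0 = 0 := by rw [dsum]; simp

theorem dsum_pos_eq {n : ℕ} (h : n ≠ 0) : dsum n = n % 10 + dsum (n / 10) := by
  rw [dsum]; simp [h]

theorem dsum_small {n : ℕ} (h : n < 10) : dsum n = n := by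
  by_cases h0 : n = 0
  · simp [h0, dsum_zero]
  · rw [dsum_pos_eq h0, Nat.mod_eq_of_lt h, Nat.div_eq_of_lt h, dsum_zero]
    omega

theorem dsum_split : ∀ p a t : ℕ, t < 10 ^ p → dsum (a * 10 ^ p + t) = dsum a + dsum t := by
  intro p
  induction p with
  | zero =>
    intro a t ht
    have : t = 0 := by omega
    subst this
    simp [dsum_zero]
  | succ p ih =>
    intro a t ht
    by_cases hx0 : a * 10 ^ (p + 1) + t = 0
    · have hP : 0 < (10:ℕ) ^ (p + 1) := Nat.pow_pos (by norm_num)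
      have ht : t = 0 := by omega
      have ha : a = 0 := by
        have h2 : a * 10 ^ (p + 1) = 0 := by omega
        rcases Nat.mul_eq_zero.mp h2 with h | h
        · exact h
        · omega
      subst ht ha
      simp [dsum_zero]
    · have h1 : a * 10 ^ (p + 1) + t = a * 10 ^ p * 10 + t := by ring
      have hmod : (a * 10 ^ p * 10 + t) % 10 = t % 10 := by omega
      have hdiv : (a * 10 ^ p * 10 + t) / 10 = a * 10 ^ p + t / 10 := by omega
      have htd : t / 10 < 10 ^ p := by
        have hp : (10:ℕ) ^ (p + 1) = 10 ^ p * 10 := by ring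
        omega
      rw [dsum_pos_eq hx0, h1, hmod, hdiv, ih a (t / 10) htd]
      by_cases ht0 : t = 0
      · subst ht0
        simp [dsum_zero]
      · rw [dsum_pos_eq ht0]
        omega

def Ssum (n : ℕ) : ℕ := ∑ k ∈ Finset.range (n + 1), dsum k

theorem Ssum_zero : Ssum 0 = 0 := by simp [Ssum, dsum_zero]

theorem sum_range_shift (f : ℕ → ℕ) (A B : ℕ) :
    ∑ k ∈ Finset.range (A + B), f k =
      (∑ k ∈ Finset.range A, f k) + ∑ i ∈ Finset.range B, f (A + i) := by
  induction B with
  | zero => simp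
  | succ B ih =>
    rw [show A + (B + 1) = (A + B) + 1 from rfl, Finset.sum_range_succ, ih, Finset.sum_range_succ]
    omega

def tri (d : ℕ) : ℕ := d * (d - 1) / 2

theorem tri_eq_sum (d : ℕ) : tri d = ∑ i ∈ Finset.range d, i := by
  have h2 := Finset.sum_range_id_mul_two d
  unfold tri
  omega

theorem tri_succ (d : ℕ) : tri (d + 1) = tri d + d := by
  rw [tri_eq_sum, tri_eq_sum, Finset.sum_range_succ]

theorem S_split (p : ℕ) : ∀ d r : ℕ, d ≤ 9 → r < 10 ^ p →
    Ssum (d * 10 ^ p + r) = Ssum r + d * Ssum (10 ^ p - 1) + tri d * 10 ^ p + d * (r + 1) := by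
  intro d
  induction d with
  | zero => intro r _ _; simp [tri]
  | succ d ih =>
    intro r hd hr
    have hP : 0 < (10:ℕ) ^ p := Nat.pow_pos (by norm_num)
    have hd1 : (d + 1) * 10 ^ p = d * 10 ^ p + 10 ^ p := by ring
    have hidx : (d + 1) * 10 ^ p + r + 1 = (d * 10 ^ p + (10 ^ p - 1) + 1) + (r + 1) := by omega
    have hsum : Ssum ((d + 1) * 10 ^ p + r) =
        Ssum (d * 10 ^ p + (10 ^ p - 1)) + ∑ i ∈ Finset.range (r + 1), dsum ((d + 1) * 10 ^ p + i) := by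
      unfold Ssum
      rw [hidx, sum_range_shift]
      congr 1
      apply Finset.sum_congr rfl
      intro i _
      congr 1
      omega
    have hterm : ∀ i ∈ Finset.range (r + 1), dsum ((d + 1) * 10 ^ p + i) = (d + 1) + dsum i := by
      intro i hi
      simp only [Finset.mem_range] at hi
      rw [dsum_split p (d + 1) i (by omega), dsum_small (by omega)]
    rw [hsum, Finset.sum_congr rfl hterm, Finset.sum_add_distrib]
    simp only [Finset.sum_const, Finset.card_range, smul_eq_mul]
    have hih := ih (10 ^ p - 1) (by omega) (by omega)
    rw [hih]
    have : (Ssum (r) : ℕ) = ∑ i ∈ Finset.range (r + 1), dsum i := rfl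
    rw [← this]
    rw [tri_succ]
    have e1 : d * (10 ^ p - 1 + 1) = d * 10 ^ p := by
      congr 1
      omega
    rw [e1]
    ring
  
theorem S_small {n : ℕ} (h : n < 10) : Ssum n = n * (n + 1) / 2 := by
  have h1 : Ssum n = ∑ k ∈ Finset.range (n + 1), k := by
    unfold Ssum
    apply Finset.sum_congr rfl
    intro k hk
    simp only [Finset.mem_range] at hk
    exact dsum_small (by omega)
  have h2 := Finset.sum_range_id_mul_two (n + 1)
  rw [show (n + 1) * (n + 1 - 1) = n * (n + 1) from by rw [Nat.add_sub_cancel]; ring] at h2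
  omega

theorem S_nines (p : ℕ) : Ssum (10 ^ (p + 1) - 1) = 10 * Ssum (10 ^ p - 1) + 45 * 10 ^ p := by
  have hP : 0 < (10:ℕ) ^ p := Nat.pow_pos (by norm_num)
  have hp1 : (10:ℕ) ^ (p + 1) = 10 ^ p * 10 := by ring
  have harg : 9 * 10 ^ p + (10 ^ p - 1) = 10 ^ (p + 1) - 1 := by omega
  have := S_split p 9 (10 ^ p - 1) (by omega) (by omega)
  rw [harg] at this
  rw [this]
  have htri : tri 9 = 36 := rfl
  rw [htri]
  have e1 : 9 * (10 ^ p - 1 + 1) = 9 * 10 ^ p := by congr 1; omega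
  rw [e1]
  ring

theorem tri_floordiv (d : ℕ) :
    PySem.Int.floordiv ((d : ℤ) * ((d : ℤ) - 1)) 2 = ((tri d : ℕ) : ℤ) := by
  by_cases h0 : d = 0
  · subst h0
    decide
  · have h1 : ((d : ℤ) - 1) = ((d - 1 : ℕ) : ℤ) := by
      have : 1 ≤ d := Nat.pos_of_ne_zero h0
      push_cast [this]
      ring
    rw [h1, show ((d:ℤ) * ((d - 1 : ℕ) : ℤ)) = (((d * (d-1) : ℕ) : ℤ)) from by push_cast; ring]
    rw [show ((2:ℤ)) = ((2:ℕ):ℤ) from rfl, PySem.Int.floordiv_natCast]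
    rfl

theorem base_eq (N : ℕ) (h : N < 10) :
    PySem.Int.floordiv ((N : ℤ) * ((N : ℤ) + 1)) 2 = ((Ssum N : ℕ) : ℤ) := by
  rw [show ((N:ℤ) * ((N:ℤ) + 1)) = (((N * (N+1) : ℕ) : ℤ)) from by push_cast; ring]
  rw [show ((2:ℤ)) = ((2:ℕ):ℤ) from rfl, PySem.Int.floordiv_natCast, S_small h]

theorem loop_eq : ∀ M : ℕ, ∀ p R : ℕ, ∀ t : ℤ, R < 10 ^ p →
    fAltLoop (M : ℤ) (((10 ^ p : ℕ) : ℕ) : ℤ) ((Ssum (10 ^ p - 1) : ℕ) : ℤ) ((R : ℕ) : ℤ) t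
      = t + ((Ssum (M * 10 ^ p + R) : ℕ) : ℤ) - ((Ssum R : ℕ) : ℤ) := by
  intro M
  induction M using Nat.strong_induction_on with
  | _ M ih =>
    intro p R t hR
    rw [fAltLoop]
    by_cases hM : 0 < (M : ℤ)
    · simp only [dif_pos hM]
      have hM0 : 0 < M := by exact_mod_cast hM
      have hfd : PySem.Int.floordiv (M : ℤ) 10 = ((M / 10 : ℕ) : ℤ) := by
        exact_mod_cast PySem.Int.floordiv_natCast M 10
      have hmd : PySem.Int.mod (M : ℤ) 10 = ((M % 10 : ℕ) : ℤ) := by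
        exact_mod_cast PySem.Int.mod_natCast M 10
      rw [hfd, hmd]
      have hd9 : M % 10 ≤ 9 := by omega
      have hP : 0 < (10:ℕ) ^ p := Nat.pow_pos (by norm_num)
      have hpow : ((10 ^ p : ℕ) : ℤ) * 10 = ((10 ^ (p + 1) : ℕ) : ℤ) := by push_cast; ring
      have hblocks : ((Ssum (10 ^ p - 1) : ℕ) : ℤ) * 10 + 45 * ((10 ^ p : ℕ) : ℤ)
          = ((Ssum (10 ^ (p + 1) - 1) : ℕ) : ℤ) := by
        rw [S_nines p]; push_cast; ring
      have hrest : ((R : ℕ) : ℤ) + ((M % 10 : ℕ) : ℤ) * ((10 ^ p : ℕ) : ℤ)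
          = ((R + M % 10 * 10 ^ p : ℕ) : ℤ) := by push_cast; ring
      have hRb : R + M % 10 * 10 ^ p < 10 ^ (p + 1) := by
        have h1 : M % 10 * 10 ^ p ≤ 9 * 10 ^ p := Nat.mul_le_mul_right _ hd9
        have h2 : (10:ℕ) ^ (p+1) = 10 ^ p * 10 := by ring
        omega
      rw [hpow, hblocks, hrest]
      rw [ih (M / 10) (Nat.div_lt_self hM0 (by norm_num)) (p + 1) (R + M % 10 * 10 ^ p) _ hRb]
      rw [tri_floordiv (M % 10)]
      have hsplit : ((Ssum (M % 10 * 10 ^ p + R) : ℕ) : ℤ)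
          = ((Ssum R : ℕ) : ℤ) + ((M % 10 : ℕ) : ℤ) * ((Ssum (10 ^ p - 1) : ℕ) : ℤ)
            + ((tri (M % 10) : ℕ) : ℤ) * ((10 ^ p : ℕ) : ℤ)
            + ((M % 10 : ℕ) : ℤ) * (((R : ℕ) : ℤ) + 1) := by
        have := S_split p (M % 10) R hd9 hR
        exact_mod_cast congrArg (fun x : ℕ => (x : ℤ)) this
      have harg : M / 10 * 10 ^ (p + 1) + (R + M % 10 * 10 ^ p) = M * 10 ^ p + R := by
        have hMd : M = 10 * (M / 10) + M % 10 := by omega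
        calc M / 10 * 10 ^ (p + 1) + (R + M % 10 * 10 ^ p)
            = (10 * (M / 10) + M % 10) * 10 ^ p + R := by ring
          _ = M * 10 ^ p + R := by rw [← hMd]
      rw [harg]
      have harg2 : R + M % 10 * 10 ^ p = M % 10 * 10 ^ p + R := by ring
      rw [harg2, hsplit]
      ring
    · simp only [dif_neg hM]
      have hM0 : M = 0 := by omega
      subst hM0
      simp

theorem ofStr?_eq (s : String) : PySem.Int.ofStr? s = PySem.Int.ofChars? s.toList := rfl

theorem fAlt_eq (s : String) (N : ℕ) (hp : PySem.Int.ofStr? s = some ((N : ℕ) : ℤ)) :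
    f_alt s = ((Ssum N : ℕ) : ℤ) := by
  simp only [f_alt, hp]
  by_cases hN : ((N : ℕ) : ℤ) < 10
  · rw [if_pos hN]
    exact base_eq N (by exact_mod_cast hN)
  · rw [if_neg hN]
    have h0 := loop_eq N 0 0 0 (by norm_num)
    norm_num [Ssum_zero] at h0
    simpa using h0

theorem fAux_eq : ∀ fuel : ℕ, ∀ s : String, ∀ N : ℕ,
    PySem.Int.ofStr? s = some ((N : ℕ) : ℤ) → s.toList.length ≤ fuel →
    fAux fuel s = ((Ssum N : ℕ) : ℤ) := by
  intro fuel
  induction fuel with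
  | zero =>
    intro s N hp hlen
    exfalso
    have hnil : s.toList = [] := List.eq_nil_of_length_eq_zero (by omega)
    rw [ofStr?_eq, hnil, ofChars?_nil] at hp
    simp at hp
  | succ fuel ih =>
    intro s N hp hlen
    simp only [fAux, hp]
    by_cases hN : ((N : ℕ) : ℤ) < 10
    · rw [if_pos hN]
      exact base_eq N (by exact_mod_cast hN)
    · rw [if_neg hN]
      have hN10 : 10 ≤ N := by exact_mod_cast not_lt.mp hN
      set L := s.toList.length with hLdef
      have hbound : N < 10 ^ L := by
        have := parse_bound s.toList ((N : ℕ) : ℤ) (by rw [← ofStr?_eq]; exact hp)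
        exact_mod_cast this
      have hL2 : 2 ≤ L := by
        rcases (show L = 0 ∨ L = 1 ∨ 2 ≤ L by omega) with h | h | h
        · rw [h] at hbound; norm_num at hbound; omega
        · rw [h] at hbound; norm_num at hbound; omega
        · exact h
      have hlen' : PySem.Str.len s = (L : ℤ) := by
        rw [PySem.Str.len_eq]
      have hexp : (PySem.Str.len s - 1).toNat = L - 1 := by
        rw [hlen']
        omega
      have hzeg : (10 : ℤ) ^ (PySem.Str.len s - 1).toNat = ((10 ^ (L - 1) : ℕ) : ℤ) := by
        rw [hexp]; push_cast; ring
      rw [hzeg]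
      set P : ℕ := 10 ^ (L - 1) with hPdef
      have hPpos : 0 < P := Nat.pow_pos (by norm_num)
      have hLP : (10:ℕ) ^ L = P * 10 := by
        rw [hPdef, ← pow_succ]
        congr 1
        omega
      have hfd : PySem.Int.floordiv ((N : ℕ) : ℤ) ((P : ℕ) : ℤ) = ((N / P : ℕ) : ℤ) :=
        PySem.Int.floordiv_natCast N P
      have hmd : PySem.Int.mod ((N : ℕ) : ℤ) ((P : ℕ) : ℤ) = ((N % P : ℕ) : ℤ) :=
        PySem.Int.mod_natCast N P
      rw [hfd, hmd]
      have hd9 : N / P ≤ 9 := by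
        have : N / P < 10 := Nat.div_lt_of_lt_mul (by omega)
        omega
      -- recursive call 1: f(str(zegop - 1))
      have hz1 : ((P : ℕ) : ℤ) - 1 = ((P - 1 : ℕ) : ℤ) := by
        push_cast [hPpos]
        omega
      have hcall1 : fAux fuel (PySem.Int.toStr (((P : ℕ) : ℤ) - 1)) = ((Ssum (P - 1) : ℕ) : ℤ) := by
        rw [hz1]
        apply ih _ (P - 1) (ofStr?_toStr_natCast (P - 1))
        rw [PySem.Int.toList_toStr, toChars_natCast]
        calc (Nat.toDigits 10 (P - 1)).length ≤ L - 1 :=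
              Nat.toDigits_length 10 (P - 1) (L - 1) (by omega) (by omega)
          _ ≤ fuel := by omega
      have hcall2 : fAux fuel (PySem.Int.toStr ((N % P : ℕ) : ℤ)) = ((Ssum (N % P) : ℕ) : ℤ) := by
        apply ih _ (N % P) (ofStr?_toStr_natCast (N % P))
        rw [PySem.Int.toList_toStr, toChars_natCast]
        calc (Nat.toDigits 10 (N % P)).length ≤ L - 1 :=
              Nat.toDigits_length 10 (N % P) (L - 1) (by omega) (by
                have := Nat.mod_lt N (y := P) (by omega)
                omega)
          _ ≤ fuel := by omega
      rw [hcall1, hcall2, tri_floordiv (N / P)]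
      have hsplit : ((Ssum (N / P * P + N % P) : ℕ) : ℤ)
          = ((Ssum (N % P) : ℕ) : ℤ) + ((N / P : ℕ) : ℤ) * ((Ssum (P - 1) : ℕ) : ℤ)
            + ((tri (N / P) : ℕ) : ℤ) * ((P : ℕ) : ℤ)
            + ((N / P : ℕ) : ℤ) * (((N % P : ℕ) : ℤ) + 1) := by
        have := S_split (L - 1) (N / P) (N % P) hd9 (by
          have := Nat.mod_lt N (y := P) (by omega)
          omega)
        rw [← hPdef] at this
        exact_mod_cast congrArg (fun x : ℕ => (x : ℤ)) this
      have harg : N / P * P + N % P = N := by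
        have h := Nat.div_add_mod N P
        rw [Nat.mul_comm P (N / P)] at h
        exact h
      rw [harg] at hsplit
      rw [hsplit]
      ring

theorem len_pos_of_parse (s : String) (n : ℤ) (hp : PySem.Int.ofStr? s = some n) :
    1 ≤ s.toList.length := by
  by_contra hc
  push_neg at hc
  have hnil : s.toList = [] := List.eq_nil_of_length_eq_zero (by omega)
  rw [ofStr?_eq, hnil, ofChars?_nil] at hp
  simp at hp

theorem f_agree (n_str : String) (hpre : Pre_f n_str) : f n_str = f_alt n_str := by
  unfold Pre_f at hpre
  rw [Option.isSome_iff_exists] at hpre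
  obtain ⟨n, hp⟩ := hpre
  by_cases hneg : n < 0
  · -- negative values take the identical base branch in both ports
    have hlen := len_pos_of_parse n_str n hp
    have hfuel : (PySem.Str.len n_str).toNat = n_str.toList.length := by
      rw [PySem.Str.len_eq]; omega
    unfold f
    rw [hfuel]
    obtain ⟨K, hK⟩ : ∃ K, n_str.toList.length = K + 1 := ⟨n_str.toList.length - 1, by omega⟩
    rw [hK]
    simp only [fAux, hp, f_alt]
    rw [if_pos (by omega), if_pos (by omega)]
  · push_neg at hneg
    set N := n.toNat with hN
    have hn' : n = ((N : ℕ) : ℤ) := by omega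
    rw [hn'] at hp
    have hfuel : n_str.toList.length ≤ (PySem.Str.len n_str).toNat := by
      rw [PySem.Str.len_eq]; omega
    unfold f
    rw [fAux_eq _ n_str N hp hfuel, fAlt_eq n_str N hp]


-- ===== VERDICT (by name: the statement is the Claim_ definition above) =====
theorem f_spec : Claim_equal_f := by
  unfold Claim_equal_f
  intro n_str _ hpre
  unfold Spec_f
  exact f_agree n_str hpre
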